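-- pv_equiv track=rewrite | github.com/He-Jiahui/zr_vm | tests/benchmarks/common/python/benchmark_runner.py | container_pipeline
-- ===== SOURCE A (Python) =====
-- from collections import deque
--
-- MOD = 1_000_000_007
--
-- def container_label(value: int) -> str:
--     if value % 2 == 0:
--         return "even"
--     if value > 128:
--         return "odd_hi"
--     return "odd_lo"
--
-- def container_pipeline(scale: int) -> int:
--     total = 1024 * scale
--     queue: deque[tuple[str, int]] = deque()
--     seen: set[tuple[int, str]] = set()
--     buckets: dict[str, list[int]] = {}
--     seed = 41
--
--     for index in range(total):
--         seed = (seed * 29 + 17 + index) % 257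
--         queue.append((container_label(seed), seed * scale + (index % 13)))
--
--     while queue:
--         label, value = queue.popleft()
--         seen.add((value, label))
--
--     for value, label in seen:
--         buckets.setdefault(label, []).append(value)
--
--     odd_lo_sum = sum(buckets.get("odd_lo", []))
--     odd_hi_sum = sum(buckets.get("odd_hi", []))
--     even_sum = sum(buckets.get("even", []))
--     unique_count = len(seen)
--     checksum = even_sum * 100000 + odd_hi_sum * 100 + odd_lo_sum + unique_count
--     return checksum % MOD
-- ===== SOURCE B (Python) =====
-- MOD = 1_000_000_007
--
-- def container_label(value: int) -> str:
--     if value % 2 == 0: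
--         return "even"
--     if value > 128:
--         return "odd_hi"
--     return "odd_lo"
--
-- def container_pipeline(scale: int) -> int:
--     # The generator state lives in [0,257) x [0,13): deduplicate (seed, index % 13)
--     # pairs with a flat boolean table instead of hashing (value, label) tuples in a
--     # set, then build the distinct (value, label) pairs and the three label sums in
--     # one bounded post-pass (<= 257*13 candidates).
--     visited = [False] * (257 * 13)
--     order = []
--     seed = 41
--     for index in range(1024 * scale):
--         seed = (seed * 29 + 17 + index) % 257
--         r = index % 13
--         k = seed * 13 + r
--         if not visited[k]:
--             visited[k] = True
--             order.append((seed, r))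
--     seen = []
--     for s, r in order:
--         pair = (s * scale + r, container_label(s))
--         if pair not in seen:
--             seen.append(pair)
--     even_sum = sum(v for v, lab in seen if lab == "even")
--     odd_hi_sum = sum(v for v, lab in seen if lab == "odd_hi")
--     odd_lo_sum = sum(v for v, lab in seen if lab == "odd_lo")
--     checksum = even_sum * 100000 + odd_hi_sum * 100 + odd_lo_sum + len(seen)
--     return checksum % MOD
-- ===== Notes on version B (the rewrite author's own statement) =====
-- stated objective: faster
-- what changed: Replaces A's deque staging, tuple-hashing set of (value,label) and dict-of-buckets grouping with a flat 257*13 boolean table that deduplicates the generator's (seed, index%13) states in O(1) per step, followed by one bounded (<=3341-candidate) post-pass that builds the distinct (value,label) pairs and the three label sums.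
import Mathlib
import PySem

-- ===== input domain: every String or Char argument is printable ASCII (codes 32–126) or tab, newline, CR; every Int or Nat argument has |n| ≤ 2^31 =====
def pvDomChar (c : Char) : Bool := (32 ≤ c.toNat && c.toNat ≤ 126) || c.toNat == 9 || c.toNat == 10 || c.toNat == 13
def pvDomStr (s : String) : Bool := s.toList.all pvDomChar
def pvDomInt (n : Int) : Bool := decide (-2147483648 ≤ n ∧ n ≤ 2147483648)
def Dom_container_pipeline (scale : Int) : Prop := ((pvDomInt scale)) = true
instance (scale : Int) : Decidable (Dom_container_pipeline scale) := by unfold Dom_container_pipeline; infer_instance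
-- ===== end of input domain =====

-- B replaces A's tuple-set pipeline (deque, set of (value,label), dict grouping) with a flat
-- boolean table over the generator's 257×13 state space and one bounded dedup post-pass.

-- ===== PORT A =====
def container_label (value : Int) : String :=
  if PySem.Int.mod value 2 == 0 then "even"
  else if value > 128 then "odd_hi"
  else "odd_lo"

def container_pipeline (scale : Int) : Int :=
  let total := 1024 * scale
  let sq := (PySem.List.pyRange 0 total 1).foldl
      (fun (st : Int × Array (String × Int)) index =>
        let seed := PySem.Int.mod (st.1 * 29 + 17 + index) 257
        (seed, st.2.push (container_label seed, seed * scale + PySem.Int.mod index 13)))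
      (41, #[])
  let seen : PySem.Set (Int × String) :=
    sq.2.foldl (fun s p => PySem.Set.add s (p.2, p.1)) PySem.Set.empty
  let buckets : PySem.Dict String (List Int) :=
    seen.foldl (fun d p => PySem.Dict.modify d p.2 [] (· ++ [p.1])) PySem.Dict.empty
  let odd_lo_sum := (PySem.Dict.getD buckets "odd_lo" []).sum
  let odd_hi_sum := (PySem.Dict.getD buckets "odd_hi" []).sum
  let even_sum := (PySem.Dict.getD buckets "even" []).sum
  let unique_count : Int := (seen.length : Int)
  let checksum := even_sum * 100000 + odd_hi_sum * 100 + odd_lo_sum + unique_count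
  PySem.Int.mod checksum 1000000007

-- ===== PORT B =====
-- visited[k] = True / visited[k] lookups hit indices 0 ≤ seed*13+r < 257*13 only, so the
-- total Python list write/read is Array.setIfInBounds / Array.getD (exact on those indices).
def container_pipeline_alt (scale : Int) : Int :=
  let st := (PySem.List.pyRange 0 (1024 * scale) 1).foldl
      (fun (st : Int × Array Bool × List (Int × Int)) index =>
        let seed := PySem.Int.mod (st.1 * 29 + 17 + index) 257
        let r := PySem.Int.mod index 13
        let k := (seed * 13 + r).toNat
        if st.2.1.getD k false then (seed, st.2.1, st.2.2)
        else (seed, st.2.1.setIfInBounds k true, st.2.2 ++ [(seed, r)]))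
      (41, Array.replicate (257 * 13) false, [])
  let seen : List (Int × String) := st.2.2.foldl
      (fun s p =>
        let pair := (p.1 * scale + p.2, container_label p.1)
        if pair ∈ s then s else s ++ [pair]) []
  let even_sum := ((seen.filter (fun p => p.2 == "even")).map (·.1)).sum
  let odd_hi_sum := ((seen.filter (fun p => p.2 == "odd_hi")).map (·.1)).sum
  let odd_lo_sum := ((seen.filter (fun p => p.2 == "odd_lo")).map (·.1)).sum
  let checksum := even_sum * 100000 + odd_hi_sum * 100 + odd_lo_sum + (seen.length : Int)
  PySem.Int.mod checksum 1000000007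

-- ===== PRECONDITION & SPEC =====
def Spec_container_pipeline (scale : Int) (out : Int) : Prop := out = container_pipeline_alt scale
instance (scale : Int) (out : Int) : Decidable (Spec_container_pipeline scale out) := by unfold Spec_container_pipeline; infer_instance

-- ===== CLAIM (what is proved, stated in full; the proofs are below) =====
def Claim_equal_container_pipeline : Prop := ∀ (scale : Int), Dom_container_pipeline scale → Spec_container_pipeline scale (container_pipeline scale)

-- ===== LEMMAS AND PROOFS =====

def seedStep (seed index : Int) : Int := PySem.Int.mod (seed * 29 + 17 + index) 257

def seedAfter (seed : Int) : List Int → Int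
  | [] => seed
  | i :: is => seedAfter (seedStep seed i) is

-- the (seed, index % 13) state sequence both loops traverse
def srSeq (seed : Int) : List Int → List (Int × Int)
  | [] => []
  | i :: is => (seedStep seed i, PySem.Int.mod i 13) :: srSeq (seedStep seed i) is

def genPairs (scale seed : Int) : List Int → List (String × Int)
  | [] => []
  | i :: is =>
    (container_label (seedStep seed i),
     seedStep seed i * scale + PySem.Int.mod i 13) :: genPairs scale (seedStep seed i) is

lemma genPairs_eq_map (scale : Int) : ∀ (idxs : List Int) (seed : Int),
    genPairs scale seed idxs
      = (srSeq seed idxs).map (fun p => (container_label p.1, p.1 * scale + p.2))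
  | [], _ => rfl
  | i :: is, seed => by
    simp only [genPairs, srSeq, List.map_cons, genPairs_eq_map scale is]

lemma foldA_eq (scale : Int) : ∀ (idxs : List Int) (seed : Int) (acc : Array (String × Int)),
    idxs.foldl
      (fun (st : Int × Array (String × Int)) index =>
        let sd := PySem.Int.mod (st.1 * 29 + 17 + index) 257
        (sd, st.2.push (container_label sd, sd * scale + PySem.Int.mod index 13)))
      (seed, acc)
    = (seedAfter seed idxs, acc ++ (genPairs scale seed idxs).toArray)
  | [], seed, acc => by simp [seedAfter, genPairs]
  | i :: is, seed, acc => by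
    simp only [List.foldl_cons, seedAfter, genPairs, foldA_eq scale is]
    simp [seedStep]

-- table invariant: entry seed*13+r is set exactly for the pairs collected so far
def TblInv (tbl : Array Bool) (d : List (Int × Int)) : Prop :=
  tbl.size = 257 * 13 ∧
  (∀ p ∈ d, 0 ≤ p.1 ∧ p.1 < 257 ∧ 0 ≤ p.2 ∧ p.2 < 13) ∧
  (∀ s r : Int, 0 ≤ s → s < 257 → 0 ≤ r → r < 13 →
      (tbl.getD (s * 13 + r).toNat false = true ↔ (s, r) ∈ d))

lemma tblInv_step (tbl : Array Bool) (d : List (Int × Int)) (s r : Int)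
    (h : TblInv tbl d) (hs0 : 0 ≤ s) (hs : s < 257) (hr0 : 0 ≤ r) (hr : r < 13)
    (hnew : tbl.getD (s * 13 + r).toNat false = false) :
    TblInv (tbl.setIfInBounds (s * 13 + r).toNat true) (d ++ [(s, r)]) := by
  obtain ⟨hsz, hrange, hmem⟩ := h
  refine ⟨by simp [Array.size_setIfInBounds, hsz], ?_, ?_⟩
  · intro p hp
    rcases List.mem_append.mp hp with hp | hp
    · exact hrange p hp
    · simp at hp; subst hp; exact ⟨hs0, hs, hr0, hr⟩
  · intro s' r' hs0' hs' hr0' hr'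
    have hk : (s * 13 + r).toNat < tbl.size := by
      rw [hsz]; omega
    have hinj : (s' * 13 + r').toNat = (s * 13 + r).toNat ↔ (s' = s ∧ r' = r) := by omega
    by_cases he : (s' * 13 + r').toNat = (s * 13 + r).toNat
    · obtain ⟨rfl, rfl⟩ := hinj.mp he
      simp [Array.getD_eq_getD_getElem?, hk]
    · have : (s', r') ∈ d ++ [(s, r)] ↔ (s', r') ∈ d := by
        simp only [List.mem_append, List.mem_singleton, Prod.mk.injEq]
        constructor
        · rintro (h | ⟨rfl, rfl⟩)
          · exact h
          · exact absurd rfl he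
        · exact Or.inl
      rw [this, ← hmem s' r' hs0' hs' hr0' hr']
      simp only [Array.getD_eq_getD_getElem?, Array.getElem?_setIfInBounds]
      rw [if_neg (fun hh => he hh.symm)]

lemma foldB_eq (scale : Int) : ∀ (idxs : List Int) (seed : Int)
    (tbl : Array Bool) (d : List (Int × Int)), TblInv tbl d →
    ((idxs.foldl
      (fun (st : Int × Array Bool × List (Int × Int)) index =>
        let sd := PySem.Int.mod (st.1 * 29 + 17 + index) 257
        let r := PySem.Int.mod index 13
        let k := (sd * 13 + r).toNat
        if st.2.1.getD k false then (sd, st.2.1, st.2.2)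
        else (sd, st.2.1.setIfInBounds k true, st.2.2 ++ [(sd, r)]))
      (seed, tbl, d)).1 = seedAfter seed idxs
    ∧ (idxs.foldl
      (fun (st : Int × Array Bool × List (Int × Int)) index =>
        let sd := PySem.Int.mod (st.1 * 29 + 17 + index) 257
        let r := PySem.Int.mod index 13
        let k := (sd * 13 + r).toNat
        if st.2.1.getD k false then (sd, st.2.1, st.2.2)
        else (sd, st.2.1.setIfInBounds k true, st.2.2 ++ [(sd, r)]))
      (seed, tbl, d)).2.2 = PySem.Set.update d (srSeq seed idxs))
  | [], seed, tbl, d, _ => by simp [seedAfter, srSeq, PySem.Set.update]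
  | i :: is, seed, tbl, d, hinv => by
    have hs0 := PySem.Int.mod_nonneg (seed * 29 + 17 + i) (b := 257) (by norm_num)
    have hs1 := PySem.Int.mod_lt (seed * 29 + 17 + i) (b := 257) (by norm_num)
    have hr0 := PySem.Int.mod_nonneg i (b := 13) (by norm_num)
    have hr1 := PySem.Int.mod_lt i (b := 13) (by norm_num)
    have hm257 : PySem.Int.mod (seed * 29 + 17 + i) 257 = (seed * 29 + 17 + i) % 257 :=
      PySem.Int.mod_eq_emod_of_pos (by norm_num)
    have hm13 : PySem.Int.mod i 13 = i % 13 :=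
      PySem.Int.mod_eq_emod_of_pos (by norm_num)
    rw [hm257] at hs0 hs1
    rw [hm13] at hr0 hr1
    simp only [List.foldl_cons, seedAfter, srSeq, seedStep, hm257, hm13]
    have hupd : PySem.Set.update d
        (((seed * 29 + 17 + i) % 257, i % 13) :: srSeq ((seed * 29 + 17 + i) % 257) is)
        = PySem.Set.update (PySem.Set.add d ((seed * 29 + 17 + i) % 257, i % 13))
            (srSeq ((seed * 29 + 17 + i) % 257) is) := rfl
    by_cases hc : tbl.getD (((seed * 29 + 17 + i) % 257) * 13 + i % 13).toNat false = true
    · have hmem : ((seed * 29 + 17 + i) % 257, i % 13) ∈ d :=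
        (hinv.2.2 _ _ hs0 hs1 hr0 hr1).mp hc
      have hadd : PySem.Set.add d ((seed * 29 + 17 + i) % 257, i % 13) = d := by
        simp [PySem.Set.add, hmem]
      rw [hupd, hadd, if_pos hc]
      exact foldB_eq scale is _ tbl d hinv
    · have hcf : tbl.getD (((seed * 29 + 17 + i) % 257) * 13 + i % 13).toNat false = false := by
        simpa using hc
      have hnmem : ((seed * 29 + 17 + i) % 257, i % 13) ∉ d := by
        rw [← hinv.2.2 _ _ hs0 hs1 hr0 hr1, hcf]; simp
      have hadd : PySem.Set.add d ((seed * 29 + 17 + i) % 257, i % 13)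
          = d ++ [((seed * 29 + 17 + i) % 257, i % 13)] := by
        simp [PySem.Set.add, hnmem]
      rw [hupd, hadd, if_neg hc]
      exact foldB_eq scale is _ _ _
        (tblInv_step tbl d _ _ hinv hs0 hs1 hr0 hr1 hcf)

lemma set_add_of_mem {β : Type} [BEq β] [LawfulBEq β] (s : PySem.Set β) (b : β)
    (h : b ∈ s) : PySem.Set.add s b = s := by
  simp [PySem.Set.add, h]

-- folding add ∘ g keeps membership and absorbs already-present images
lemma mem_foldl_add {α β : Type} [BEq β] [LawfulBEq β] (g : α → β) :
    ∀ (l : List α) (s : PySem.Set β) (b : β), b ∈ s →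
      b ∈ l.foldl (fun s x => PySem.Set.add s (g x)) s
  | [], _, _, hb => hb
  | x :: l, s, b, hb =>
    mem_foldl_add g l _ b ((PySem.Set.mem_add s (g x) b).mpr (Or.inl hb))

lemma mem_img_foldl_add {α β : Type} [BEq β] [LawfulBEq β] (g : α → β) :
    ∀ (d : List α) (s : PySem.Set β) (y : α), y ∈ d →
      g y ∈ d.foldl (fun s x => PySem.Set.add s (g x)) s
  | x :: d, s, y, hy => by
    rcases List.mem_cons.mp hy with rfl | hy
    · exact mem_foldl_add g d _ _ ((PySem.Set.mem_add s (g y) (g y)).mpr (Or.inr rfl))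
    · exact mem_img_foldl_add g d _ y hy

-- deduplicating first (Set.update) does not change the image set built by add ∘ g
lemma foldl_add_update {α β : Type} [BEq α] [LawfulBEq α] [BEq β] [LawfulBEq β] (g : α → β) :
    ∀ (xs : List α) (d : PySem.Set α) (s : PySem.Set β),
      (PySem.Set.update d xs).foldl (fun s x => PySem.Set.add s (g x)) s
        = xs.foldl (fun s x => PySem.Set.add s (g x))
            (d.foldl (fun s x => PySem.Set.add s (g x)) s)
  | [], d, s => by simp [PySem.Set.update]
  | x :: xs, d, s => by
    simp only [PySem.Set.update, List.foldl_cons]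
    have ih := foldl_add_update g xs
    simp only [PySem.Set.update] at ih
    by_cases hx : x ∈ d
    · have hadd : PySem.Set.add d x = d := by simp [PySem.Set.add, hx]
      have himg : g x ∈ d.foldl (fun s x => PySem.Set.add s (g x)) s :=
        mem_img_foldl_add g d s x hx
      rw [hadd, ih d s, set_add_of_mem _ _ himg]
    · have hadd : PySem.Set.add d x = d ++ [x] := by simp [PySem.Set.add, hx]
      rw [hadd, ih (d ++ [x]) s]
      simp [List.foldl_append]

lemma buckets_getD (seen : List (Int × String)) (ℓ : String) :
    PySem.Dict.getD
      (seen.foldl (fun d p => PySem.Dict.modify d p.2 [] (· ++ [p.1])) PySem.Dict.empty) ℓ []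
    = (seen.filter (fun p => p.2 == ℓ)).map (·.1) := by
  have h := PySem.Dict.getD_foldl_modify_append
      (l := seen.map (fun p => (p.2, p.1))) (d := PySem.Dict.empty) (c := ℓ)
  rw [List.foldl_map] at h
  simpa [List.filter_map, Function.comp] using h

-- ===== VERDICT (by name: the statement is the Claim_ definition above) =====
theorem container_pipeline_spec : Claim_equal_container_pipeline := by
  intro scale _
  show container_pipeline scale = container_pipeline_alt scale
  unfold container_pipeline container_pipeline_alt
  have hinv0 : TblInv (Array.replicate (257 * 13) false) [] := by
    refine ⟨by simp, by simp, ?_⟩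
    intro s r hs0 hs hr0 hr
    have : (s * 13 + r).toNat < 257 * 13 := by omega
    simp [Array.getD_eq_getD_getElem?, this]
  have hB := foldB_eq scale (PySem.List.pyRange 0 (1024 * scale) 1) 41
      (Array.replicate (257 * 13) false) [] hinv0
  simp only [foldA_eq scale, hB.2, Array.empty_append, List.foldl_toArray,
    genPairs_eq_map scale]
  have hstep : (fun (s : List (Int × String)) (p : Int × Int) =>
        let pair := (p.1 * scale + p.2, container_label p.1)
        if pair ∈ s then s else s ++ [pair])
      = (fun s p => PySem.Set.add s (p.1 * scale + p.2, container_label p.1)) := by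
    funext s p
    simp [PySem.Set.add]
  rw [hstep]
  have hA : ((srSeq 41 (PySem.List.pyRange 0 (1024 * scale) 1)).map
        (fun p => (container_label p.1, p.1 * scale + p.2))).foldl
        (fun s p => PySem.Set.add s (p.2, p.1)) PySem.Set.empty
      = (srSeq 41 (PySem.List.pyRange 0 (1024 * scale) 1)).foldl
        (fun s p => PySem.Set.add s (p.1 * scale + p.2, container_label p.1))
        PySem.Set.empty := by
    rw [List.foldl_map]
  have hdedup := foldl_add_update
      (g := fun p : Int × Int => (p.1 * scale + p.2, container_label p.1))
      (srSeq 41 (PySem.List.pyRange 0 (1024 * scale) 1)) [] PySem.Set.empty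
  simp only [List.foldl_nil] at hdedup
  simp only [PySem.Set.empty] at hA hdedup ⊢
  simp only [hA, hdedup, buckets_getD]
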